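-- pv_equiv track=rewrite | github.com/DeepSharma2021/encryptionusingrepeatedpermutation | permutation.py | repeated_permutation
-- ===== SOURCE A (Python) =====
-- from itertools import product
--
-- def all_repeat(str1, rno):
--   chars = list(str1)
--   results = []
--   for c in product(chars, repeat = rno):
--     results.append(c)
--   return results
--
-- def repeated_permutation(a,b):
--   repetedperm= all_repeat(a,b)
--   rp= []
--   for i in repetedperm:
--     x1= ''
--     for j in i:
--       x1= x1+j
--     rp.append(x1)
--   return rp
-- ===== SOURCE B (Python) =====
-- def repeated_permutation(a, b):
--     chars = list(a)
--     result = ['']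
--     for _ in range(b):
--         result = [c + s for c in chars for s in result]
--     return result
-- ===== Notes on version B (the rewrite author's own statement) =====
-- stated objective: simpler
-- what changed: B drops itertools.product and the second tuple-joining pass: it builds the strings directly by iterating b rounds of prepending each character to every partial string, starting from [''].
import Mathlib
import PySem

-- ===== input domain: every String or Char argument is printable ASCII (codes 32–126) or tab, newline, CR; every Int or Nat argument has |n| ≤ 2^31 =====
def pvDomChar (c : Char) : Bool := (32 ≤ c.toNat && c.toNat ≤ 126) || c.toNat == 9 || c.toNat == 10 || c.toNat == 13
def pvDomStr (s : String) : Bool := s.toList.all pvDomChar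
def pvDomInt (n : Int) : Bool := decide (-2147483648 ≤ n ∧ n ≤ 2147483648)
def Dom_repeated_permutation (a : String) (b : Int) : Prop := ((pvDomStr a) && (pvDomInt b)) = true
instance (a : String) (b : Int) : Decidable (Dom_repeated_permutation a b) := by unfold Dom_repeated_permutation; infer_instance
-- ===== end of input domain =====

-- B replaces itertools.product + a tuple-joining pass by one loop that prepends characters to partial strings ("simpler" objective, same cost).

-- ===== PORT A =====
-- itertools.product(chars, repeat = rno): all rno-tuples, first position varying slowest;
-- exact for rno ≥ 0 (Pre_ excludes rno < 0, where Python raises ValueError).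
-- product folds over its rno pools left to right: result = [t+[c] for t in result for c in pool]
def pvProdRepeat (chars : List Char) (n : Nat) : List (List Char) :=
  (List.range n).foldl (fun result _ => result.flatMap (fun t => chars.map (fun c => t ++ [c]))) [[]]

-- all_repeat's loop 'for c in product: results.append(c)': an append-only loop, ported head-first
def pvAllRepeatLoop : List (List Char) → List (List Char)
  | [] => []
  | c :: rest => c :: pvAllRepeatLoop rest

def pvAllRepeat (str1 : String) (rno : Int) : List (List Char) :=
  pvAllRepeatLoop (pvProdRepeat str1.toList rno.toNat)

-- the outer loop 'for i in repetedperm: … rp.append(x1)' (append-only, ported head-first);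
-- inner loop x1 = x1 + j ported over List Char (String.mk at the end; exact for string concatenation)
def pvRpLoop : List (List Char) → List String
  | [] => []
  | i :: rest => String.mk (i.foldl (fun x1 j => x1 ++ [j]) []) :: pvRpLoop rest

def repeated_permutation (a : String) (b : Int) : List String :=
  let repetedperm := pvAllRepeat a b
  pvRpLoop repetedperm

-- ===== PORT B =====
-- one round: result = [c + s for c in chars for s in result] (strings as List Char)
def pvPrependStep (chars : List Char) (result : List (List Char)) : List (List Char) :=
  chars.flatMap (fun c => result.map (fun s => c :: s))

def repeated_permutation_alt (a : String) (b : Int) : List String :=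
  let chars := a.toList
  ((PySem.List.pyRange 0 b 1).foldl (fun result _ => pvPrependStep chars result) [[]]).map String.mk

-- ===== PRECONDITION & SPEC =====
-- Pre_ excludes b < 0, where A raises ValueError (itertools.product refuses a negative repeat).
def Pre_repeated_permutation (_a : String) (b : Int) : Prop := 0 ≤ b
instance (a : String) (b : Int) : Decidable (Pre_repeated_permutation a b) := by unfold Pre_repeated_permutation; infer_instance
def pvWitness_repeated_permutation : String × Int := ("ab", 2)

def Spec_repeated_permutation (a : String) (b : Int) (out : List String) : Prop := out = repeated_permutation_alt a b
instance (a : String) (b : Int) (out : List String) : Decidable (Spec_repeated_permutation a b out) := by unfold Spec_repeated_permutation; infer_instance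

-- ===== CLAIM (what is proved, stated in full; the proofs are below) =====
def Claim_equal_repeated_permutation : Prop := ∀ (a : String) (b : Int), Dom_repeated_permutation a b → Pre_repeated_permutation a b → Spec_repeated_permutation a b (repeated_permutation a b)

-- ===== LEMMAS AND PROOFS =====

lemma foldl_snoc {α : Type} (l acc : List α) : l.foldl (fun x j => x ++ [j]) acc = acc ++ l := by
  induction l generalizing acc with
  | nil => simp [List.foldl]
  | cons h t ih => simp [List.foldl, ih]

def pvAppendStep (chars : List Char) (result : List (List Char)) : List (List Char) :=
  result.flatMap (fun t => chars.map (fun c => t ++ [c]))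

lemma step_comm (chars : List Char) (L : List (List Char)) :
    pvAppendStep chars (pvPrependStep chars L) = pvPrependStep chars (pvAppendStep chars L) := by
  simp [pvAppendStep, pvPrependStep, List.flatMap_assoc, List.map_flatMap, List.flatMap_map, Function.comp_def]

lemma append_eq_prepend (chars : List Char) (n : Nat) :
    pvAppendStep chars ((pvAppendStep chars)^[n] [[]]) = pvPrependStep chars ((pvAppendStep chars)^[n] [[]]) := by
  induction n with
  | zero =>
    simp only [Function.iterate_zero, id_eq, pvAppendStep, pvPrependStep]
    induction chars <;> simp_all [List.flatMap]
  | succ n ih =>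
    rw [Function.iterate_succ_apply', ih, step_comm, ← ih]

lemma foldl_const_len {α β : Type} (f : β → β) (l : List α) (init : β) :
    l.foldl (fun r _ => f r) init = f^[l.length] init := by
  induction l generalizing init with
  | nil => simp
  | cons h t ih => simp [List.foldl, ih, Function.iterate_succ_apply]

lemma iterate_prepend (chars : List Char) (n : Nat) :
    (pvPrependStep chars)^[n] [[]] = pvProdRepeat chars n := by
  have hiter : (pvPrependStep chars)^[n] [[]] = (pvAppendStep chars)^[n] [[]] := by
    induction n with
    | zero => rfl
    | succ n ih =>
      rw [Function.iterate_succ_apply', ih, ← append_eq_prepend]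
      exact (Function.iterate_succ_apply' _ _ _).symm
  rw [hiter]
  unfold pvProdRepeat pvAppendStep
  rw [foldl_const_len, List.length_range]

lemma allRepeatLoop_id (l : List (List Char)) : pvAllRepeatLoop l = l := by
  induction l with
  | nil => rfl
  | cons h t ih => simp [pvAllRepeatLoop, ih]

lemma rpLoop_map (l : List (List Char)) : pvRpLoop l = l.map String.mk := by
  induction l with
  | nil => rfl
  | cons h t ih => simp only [pvRpLoop, ih, foldl_snoc, List.nil_append, List.map_cons]

-- ===== VERDICT (by name: the statement is the Claim_ definition above) =====
theorem repeated_permutation_spec : Claim_equal_repeated_permutation := by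
  intro a b _ hb
  unfold Spec_repeated_permutation repeated_permutation repeated_permutation_alt pvAllRepeat
  dsimp only
  rw [foldl_const_len]
  have hlen : (PySem.List.pyRange 0 b 1).length = b.toNat := by
    simp [PySem.List.length_pyRange_one]
  rw [hlen, iterate_prepend, allRepeatLoop_id, rpLoop_map]
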